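-- pv_equiv track=rewrite | github.com/Samm-Py/jetgp | tests/jetgp_wdegp/jetgp_wdegp_nsub_sweep_morris.py | theoretical_optimal_n_sub
-- ===== SOURCE A (Python) =====
-- def theoretical_optimal_n_sub(n_train, D):
--     """n_sub that minimises n_sub * (n_train + D * pts_per_sub)^3."""
--     best_cost, best_n = float('inf'), n_train
--     for n in range(1, n_train + 1):
--         if n_train % n != 0:
--             continue
--         m = n_train + D * (n_train // n)
--         cost = n * m ** 3
--         if cost < best_cost:
--             best_cost, best_n = cost, n
--     return best_n
-- ===== SOURCE B (Python) =====
-- def theoretical_optimal_n_sub(n_train, D):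
--     """n_sub that minimises n_sub * (n_train + D * pts_per_sub)^3.
--
--     Enumerates divisor pairs up to sqrt(n_train) instead of scanning the
--     whole range 1..n_train, then scans the divisors in increasing order.
--     """
--     small, large = [], []
--     i = 1
--     while i * i <= n_train:
--         if n_train % i == 0:
--             small.append(i)
--             q = n_train // i
--             if q != i:
--                 large.append(q)
--         i += 1
--     best_cost, best_n = None, n_train
--     for n in small + large[::-1]:
--         m = n_train + D * (n_train // n)
--         cost = n * m ** 3
--         if best_cost is None or cost < best_cost:
--             best_cost, best_n = cost, n
--     return best_n
-- ===== Notes on version B (the rewrite author's own statement) =====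
-- stated objective: faster
-- what changed: B enumerates divisor pairs (i, n_train//i) only up to sqrt(n_train) and scans the divisors in increasing order, instead of testing every n in 1..n_train for divisibility.
import Mathlib
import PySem

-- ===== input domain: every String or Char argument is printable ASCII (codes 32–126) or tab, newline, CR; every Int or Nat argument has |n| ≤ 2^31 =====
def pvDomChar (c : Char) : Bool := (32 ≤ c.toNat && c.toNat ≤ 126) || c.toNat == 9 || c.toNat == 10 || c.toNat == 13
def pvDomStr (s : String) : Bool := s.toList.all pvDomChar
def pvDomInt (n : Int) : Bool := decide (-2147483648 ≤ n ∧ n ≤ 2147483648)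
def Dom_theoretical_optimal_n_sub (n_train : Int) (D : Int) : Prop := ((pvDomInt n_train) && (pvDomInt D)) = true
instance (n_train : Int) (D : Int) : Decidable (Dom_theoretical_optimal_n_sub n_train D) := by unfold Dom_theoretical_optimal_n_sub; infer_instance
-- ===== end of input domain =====

-- B replaces A's O(n_train) scan of 1..n_train by enumerating divisor pairs up to sqrt(n_train), then
-- scanning the divisors in increasing order (faster: asymptotic, O(sqrt(n_train))).


-- ===== PORT A =====
-- best_cost : Option Int (none = float('inf')); the loop body of A
def pvStepA (n_train D : Int) (st : Option Int × Int) (n : Int) : Option Int × Int :=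
  if PySem.Int.mod n_train n ≠ 0 then st
  else
    let m := n_train + D * PySem.Int.floordiv n_train n
    let cost := n * m ^ 3
    match st.1 with
    | none => (some cost, n)
    | some bc => if cost < bc then (some cost, n) else st

def theoretical_optimal_n_sub (n_train : Int) (D : Int) : Int :=
  ((PySem.List.pyRange 1 (n_train + 1) 1).foldl (pvStepA n_train D) (none, n_train)).2

-- ===== PORT B =====
-- needed by pvDivPairs's termination proof
theorem pv_int_le_mul_self (i : Int) : i ≤ i * i := by nlinarith [mul_self_nonneg i, mul_self_nonneg (i - 1)]

-- the while-loop of B: collect divisors ≤ sqrt in `small`, their cofactors in `large`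
def pvDivPairs (n_train i : Int) (small large : List Int) : List Int × List Int :=
  if _h : i * i ≤ n_train then
    if PySem.Int.mod n_train i = 0 then
      let q := PySem.Int.floordiv n_train i
      pvDivPairs n_train (i + 1) (small ++ [i]) (if q ≠ i then large ++ [q] else large)
    else
      pvDivPairs n_train (i + 1) small large
  else
    (small, large)
termination_by (n_train + 1 - i).toNat
decreasing_by
  all_goals
    have h1 : i ≤ i * i := pv_int_le_mul_self i
    omega

-- the min-scan loop body of B (no divisibility test; best_cost : Option Int, none = None)
def pvStepB (n_train D : Int) (st : Option Int × Int) (n : Int) : Option Int × Int :=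
  let m := n_train + D * PySem.Int.floordiv n_train n
  let cost := n * m ^ 3
  match st.1 with
  | none => (some cost, n)
  | some bc => if cost < bc then (some cost, n) else st

def theoretical_optimal_n_sub_alt (n_train : Int) (D : Int) : Int :=
  let sl := pvDivPairs n_train 1 [] []
  let ds := sl.1 ++ ((PySem.List.slice? sl.2 none none (-1)).getD [])
  (ds.foldl (pvStepB n_train D) (none, n_train)).2

-- ===== PRECONDITION & SPEC =====
def Spec_theoretical_optimal_n_sub (n_train : Int) (D : Int) (out : Int) : Prop := out = theoretical_optimal_n_sub_alt n_train D
instance (n_train : Int) (D : Int) (out : Int) : Decidable (Spec_theoretical_optimal_n_sub n_train D out) := by unfold Spec_theoretical_optimal_n_sub; infer_instance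

-- ===== CLAIM (what is proved, stated in full; the proofs are below) =====
def Claim_equal_theoretical_optimal_n_sub : Prop := ∀ (n_train : Int) (D : Int), Dom_theoretical_optimal_n_sub n_train D → Spec_theoretical_optimal_n_sub n_train D (theoretical_optimal_n_sub n_train D)


-- ===== LEMMAS AND PROOFS =====

-- generic ediv facts used below
theorem pv_ediv_mul_le (a b : Int) (hb : 0 < b) : a / b * b ≤ a :=
  Int.ediv_mul_le a (ne_of_gt hb)

theorem pv_ediv_antitone (n i : Int) (hn : 0 ≤ n) (hi : 0 < i) : n / (i + 1) ≤ n / i := by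
  rw [Int.le_ediv_iff_mul_le hi]
  have h1 : 0 ≤ n / (i + 1) := Int.ediv_nonneg hn (by omega)
  have h2 : n / (i + 1) * (i + 1) ≤ n := pv_ediv_mul_le n (i + 1) (by omega)
  nlinarith

-- A's loop body is B's loop body guarded by the divisibility test
theorem pv_stepA_eq (n D : Int) (st : Option Int × Int) (x : Int) :
    pvStepA n D st x = if PySem.Int.mod n x = 0 then pvStepB n D st x else st := by
  by_cases h : PySem.Int.mod n x = 0 <;> simp [pvStepA, pvStepB, h]

-- folding A's body over a list = folding B's body over the divisible elements
theorem pv_foldA_filter (n D : Int) (l : List Int) (init : Option Int × Int) :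
    l.foldl (pvStepA n D) init
      = (l.filter (fun x => decide (PySem.Int.mod n x = 0))).foldl (pvStepB n D) init := by
  induction l generalizing init with
  | nil => rfl
  | cons a t ih =>
    by_cases h : PySem.Int.mod n a = 0 <;>
      simp [List.foldl_cons, h, pv_stepA_eq, ih]

-- membership in the `small` component of pvDivPairs
theorem pv_mem_fst (n i : Int) (s l : List Int) (x : Int) (hi : 1 ≤ i) :
    x ∈ (pvDivPairs n i s l).1 ↔ x ∈ s ∨ (i ≤ x ∧ x * x ≤ n ∧ PySem.Int.mod n x = 0) := by
  fun_induction pvDivPairs n i s l with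
  | case1 i s l hle hmod q ih =>
    simp only [dite_eq_ite] at ih
    rw [ih (by omega)]
    constructor
    · rintro (hx | ⟨h1, h2, h3⟩)
      · rcases List.mem_append.mp hx with hx | hx
        · exact Or.inl hx
        · simp only [List.mem_singleton] at hx; subst hx
          exact Or.inr ⟨le_refl _, hle, hmod⟩
      · exact Or.inr ⟨by omega, h2, h3⟩
    · rintro (hx | ⟨h1, h2, h3⟩)
      · exact Or.inl (List.mem_append.mpr (Or.inl hx))
      · by_cases hxi : x = i
        · subst hxi; exact Or.inl (List.mem_append.mpr (Or.inr (by simp)))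
        · exact Or.inr ⟨by omega, h2, h3⟩
  | case2 i s l hle hmod ih =>
    rw [ih (by omega)]
    constructor
    · rintro (hx | ⟨h1, h2, h3⟩)
      · exact Or.inl hx
      · exact Or.inr ⟨by omega, h2, h3⟩
    · rintro (hx | ⟨h1, h2, h3⟩)
      · exact Or.inl hx
      · rcases eq_or_lt_of_le h1 with hxi | hxi
        · exact absurd h3 (hxi ▸ hmod)
        · exact Or.inr ⟨by omega, h2, h3⟩
  | case3 i s l hle =>
    constructor
    · exact Or.inl
    · rintro (hx | ⟨h1, h2, h3⟩)
      · exact hx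
      · exact absurd h2 (by nlinarith)

-- membership in the `large` component of pvDivPairs
theorem pv_mem_snd (n i : Int) (s l : List Int) (x : Int) (hi : 1 ≤ i) :
    x ∈ (pvDivPairs n i s l).2 ↔ x ∈ l ∨
      ∃ j, i ≤ j ∧ j * j ≤ n ∧ PySem.Int.mod n j = 0 ∧ x = PySem.Int.floordiv n j ∧ x ≠ j := by
  fun_induction pvDivPairs n i s l with
  | case1 i s l hle hmod q ih =>
    (try simp only [dite_eq_ite] at ih)
    rw [ih (by omega)]
    by_cases hqi : PySem.Int.floordiv n i = i
    · rw [if_neg (show ¬ q ≠ i from fun h => h hqi)]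
      constructor
      · rintro (hx | ⟨j, h1, h2, h3, h4, h5⟩)
        · exact Or.inl hx
        · exact Or.inr ⟨j, by omega, h2, h3, h4, h5⟩
      · rintro (hx | ⟨j, h1, h2, h3, h4, h5⟩)
        · exact Or.inl hx
        · rcases eq_or_lt_of_le h1 with hji | hji
          · exact absurd (h4.trans (by rw [← hji, hqi])) h5
          · exact Or.inr ⟨j, by omega, h2, h3, h4, h5⟩
    · rw [if_pos hqi]
      simp only [List.mem_append, List.mem_singleton]
      constructor
      · rintro ((hx | hx) | ⟨j, h1, h2, h3, h4, h5⟩)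
        · exact Or.inl hx
        · exact Or.inr ⟨i, le_rfl, hle, hmod, hx, fun h => hqi (hx.symm.trans h)⟩
        · exact Or.inr ⟨j, by omega, h2, h3, h4, h5⟩
      · rintro (hx | ⟨j, h1, h2, h3, h4, h5⟩)
        · exact Or.inl (Or.inl hx)
        · rcases eq_or_lt_of_le h1 with hji | hji
          · exact Or.inl (Or.inr (by rw [h4, ← hji]))
          · exact Or.inr ⟨j, by omega, h2, h3, h4, h5⟩
  | case2 i s l hle hmod ih =>
    rw [ih (by omega)]
    constructor
    · rintro (hx | ⟨j, h1, h2, h3, h4, h5⟩)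
      · exact Or.inl hx
      · exact Or.inr ⟨j, by omega, h2, h3, h4, h5⟩
    · rintro (hx | ⟨j, h1, h2, h3, h4, h5⟩)
      · exact Or.inl hx
      · rcases eq_or_lt_of_le h1 with hji | hji
        · exact absurd h3 (hji ▸ hmod)
        · exact Or.inr ⟨j, by omega, h2, h3, h4, h5⟩
  | case3 i s l hle =>
    constructor
    · exact Or.inl
    · rintro (hx | ⟨j, h1, h2, h3, h4, h5⟩)
      · exact hx
      · exact absurd h2 (by nlinarith)

-- `small` is strictly increasing
theorem pv_pairwise_fst (n i : Int) (s l : List Int) (hi : 1 ≤ i)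
    (hs : s.Pairwise (· < ·)) (hlt : ∀ y ∈ s, y < i) :
    ((pvDivPairs n i s l).1).Pairwise (· < ·) := by
  fun_induction pvDivPairs n i s l with
  | case1 i s l hle hmod q ih =>
    simp only [dite_eq_ite] at ih
    refine ih (by omega) ?_ ?_
    · rw [List.pairwise_append]
      exact ⟨hs, by simp, by intro a ha b hb; simp only [List.mem_singleton] at hb; subst hb; exact hlt a ha⟩
    · intro y hy
      rcases List.mem_append.mp hy with hy | hy
      · have := hlt y hy; omega
      · simp only [List.mem_singleton] at hy; omega
  | case2 i s l hle hmod ih =>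
    exact ih (by omega) hs (fun y hy => by have := hlt y hy; omega)
  | case3 i s l hle => exact hs

-- `large` is strictly decreasing
theorem pv_pairwise_snd (n i : Int) (s l : List Int) (hi : 1 ≤ i)
    (hl : l.Pairwise (fun a b => b < a)) (hgt : ∀ y ∈ l, PySem.Int.floordiv n i < y) :
    ((pvDivPairs n i s l).2).Pairwise (fun a b => b < a) := by
  fun_induction pvDivPairs n i s l with
  | case1 i s l hle hmod q ih =>
    have hipos : (0:Int) < i := by omega
    have hn1 : (1:Int) ≤ n := by nlinarith
    have hdvd : i ∣ n := (PySem.Int.mod_eq_zero_iff_dvd n i).mp hmod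
    have hfd : PySem.Int.floordiv n i = n / i := PySem.Int.floordiv_eq_ediv_of_pos hipos
    have hfd1 : PySem.Int.floordiv n (i + 1) = n / (i + 1) :=
      PySem.Int.floordiv_eq_ediv_of_pos (by omega)
    have hq1 : 1 ≤ n / i := by
      rw [Int.le_ediv_iff_mul_le hipos]; nlinarith
    have hqi : n / i * i = n := Int.ediv_mul_cancel hdvd
    have hstep : n / (i + 1) < n / i := by
      rw [Int.ediv_lt_iff_lt_mul (by omega)]; nlinarith
    have hmono : n / (i + 1) ≤ n / i := pv_ediv_antitone n i (by omega) hipos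
    (try simp only [dite_eq_ite] at ih)
    by_cases hne : PySem.Int.floordiv n i ≠ i
    · rw [if_pos hne] at ih ⊢
      refine ih (by omega) ?_ ?_
      · rw [List.pairwise_append]
        refine ⟨hl, by simp, ?_⟩
        intro a ha b hb; simp only [List.mem_singleton] at hb; subst hb
        exact hgt a ha
      · intro y hy
        rcases List.mem_append.mp hy with hy | hy
        · have := hgt y hy; rw [hfd] at this; rw [hfd1]; omega
        · simp only [List.mem_singleton] at hy; subst hy
          rw [hfd1]; exact lt_of_lt_of_le hstep (le_of_eq hfd.symm)
    · rw [if_neg hne] at ih ⊢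
      refine ih (by omega) hl ?_
      intro y hy
      have := hgt y hy; rw [hfd] at this; rw [hfd1]; omega
  | case2 i s l hle hmod ih =>
    have hipos : (0:Int) < i := by omega
    have hn0 : (0:Int) ≤ n := by nlinarith
    refine ih (by omega) hl ?_
    intro y hy
    have := hgt y hy
    rw [PySem.Int.floordiv_eq_ediv_of_pos hipos] at this
    rw [PySem.Int.floordiv_eq_ediv_of_pos (show (0:Int) < i + 1 by omega)]
    have := pv_ediv_antitone n i hn0 hipos
    omega
  | case3 i s l hle => exact hl

-- every element of `large` is a divisor above the square root
theorem pv_snd_large (n x : Int) (hn : 1 ≤ n) (hx : x ∈ (pvDivPairs n 1 [] []).2) :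
    1 ≤ x ∧ x ≤ n ∧ n < x * x ∧ PySem.Int.mod n x = 0 := by
  rcases (pv_mem_snd n 1 [] [] x le_rfl).mp hx with h | ⟨j, h1, h2, h3, h4, h5⟩
  · simp at h
  · have hjpos : (0:Int) < j := by omega
    have hdvd : j ∣ n := (PySem.Int.mod_eq_zero_iff_dvd n j).mp h3
    have hfd : PySem.Int.floordiv n j = n / j := PySem.Int.floordiv_eq_ediv_of_pos hjpos
    have hxj : x * j = n := by rw [h4, hfd]; exact Int.ediv_mul_cancel hdvd
    have hx1 : 1 ≤ x := by
      rw [h4, hfd, Int.le_ediv_iff_mul_le hjpos]; nlinarith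
    have hgtj : j < x := by
      rcases lt_trichotomy x j with h | h | h
      · nlinarith
      · exact absurd (h ▸ rfl) h5
      · exact h
    refine ⟨hx1, by nlinarith, by nlinarith, ?_⟩
    rw [PySem.Int.mod_eq_zero_iff_dvd]
    exact ⟨j, by omega⟩

-- every element of `small` is a divisor at most the square root
theorem pv_fst_small (n x : Int) (hx : x ∈ (pvDivPairs n 1 [] []).1) :
    1 ≤ x ∧ x * x ≤ n ∧ PySem.Int.mod n x = 0 := by
  rcases (pv_mem_fst n 1 [] [] x le_rfl).mp hx with h | ⟨h1, h2, h3⟩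
  · simp at h
  · exact ⟨h1, h2, h3⟩

-- the divisor list B builds equals the increasing list of all divisors of n
theorem pv_divlist_eq (n : Int) (hn : 1 ≤ n) :
    (pvDivPairs n 1 [] []).1 ++ ((pvDivPairs n 1 [] []).2).reverse
      = (PySem.List.pyRange 1 (n + 1) 1).filter (fun x => decide (PySem.Int.mod n x = 0)) := by
  have hpairL : ((pvDivPairs n 1 [] []).1 ++ ((pvDivPairs n 1 [] []).2).reverse).Pairwise (· < ·) := by
    rw [List.pairwise_append]
    refine ⟨pv_pairwise_fst n 1 [] [] le_rfl (by simp) (by simp),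
      List.pairwise_reverse.mpr (pv_pairwise_snd n 1 [] [] le_rfl (by simp) (by simp)), ?_⟩
    intro a ha b hb
    rw [List.mem_reverse] at hb
    obtain ⟨ha1, ha2, _⟩ := pv_fst_small n a ha
    obtain ⟨hb1, _, hb3, _⟩ := pv_snd_large n b hn hb
    nlinarith
  have hpairR : ((PySem.List.pyRange 1 (n + 1) 1).filter
      (fun x => decide (PySem.Int.mod n x = 0))).Pairwise (· < ·) :=
    (PySem.List.pairwise_lt_pyRange_one 1 (n + 1)).filter _
  have hmem : ∀ x, (x ∈ (pvDivPairs n 1 [] []).1 ++ ((pvDivPairs n 1 [] []).2).reverse) ↔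
      (x ∈ (PySem.List.pyRange 1 (n + 1) 1).filter (fun x => decide (PySem.Int.mod n x = 0))) := by
    intro x
    rw [List.mem_append, List.mem_reverse, List.mem_filter]
    simp only [PySem.List.mem_pyRange_one, decide_eq_true_eq]
    constructor
    · rintro (hx | hx)
      · obtain ⟨h1, h2, h3⟩ := pv_fst_small n x hx
        exact ⟨⟨h1, by nlinarith⟩, h3⟩
      · obtain ⟨h1, h2, _, h4⟩ := pv_snd_large n x hn hx
        exact ⟨⟨h1, by omega⟩, h4⟩
    · rintro ⟨⟨h1, h2⟩, h3⟩
      have hxpos : (0:Int) < x := by omega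
      have hxn : x ≤ n := by omega
      by_cases hsq : x * x ≤ n
      · exact Or.inl ((pv_mem_fst n 1 [] [] x le_rfl).mpr (Or.inr ⟨h1, hsq, h3⟩))
      · refine Or.inr ((pv_mem_snd n 1 [] [] x le_rfl).mpr (Or.inr ⟨n / x, ?_⟩))
        have hdvd : x ∣ n := (PySem.Int.mod_eq_zero_iff_dvd n x).mp h3
        have hjx : n / x * x = n := Int.ediv_mul_cancel hdvd
        have hj1 : 1 ≤ n / x := by rw [Int.le_ediv_iff_mul_le hxpos]; omega
        have hjlt : n / x < x := by
          rcases lt_trichotomy (n / x) x with h | h | h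
          · exact h
          · nlinarith
          · nlinarith
        refine ⟨hj1, by nlinarith, ?_, ?_, by omega⟩
        · rw [PySem.Int.mod_eq_zero_iff_dvd]; exact ⟨x, by omega⟩
        · rw [PySem.Int.floordiv_eq_ediv_of_pos (by omega : (0:Int) < n / x)]
          have h6 : n / x * x / (n / x) = x := Int.mul_ediv_cancel_left _ (by omega)
          rw [hjx] at h6
          exact h6.symm
  have hnodupL : ((pvDivPairs n 1 [] []).1 ++ ((pvDivPairs n 1 [] []).2).reverse).Nodup :=
    hpairL.imp (fun h => ne_of_lt h)
  have hnodupR : ((PySem.List.pyRange 1 (n + 1) 1).filter (fun x => decide (PySem.Int.mod n x = 0))).Nodup :=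
    hpairR.imp (fun h => ne_of_lt h)
  exact List.Perm.eq_of_pairwise
    (fun a b _ _ hab hba => le_antisymm (le_of_lt hab) (le_of_lt hba))
    hpairL hpairR ((List.perm_ext_iff_of_nodup hnodupL hnodupR).mpr hmem)

theorem main_equiv (n D : Int) : theoretical_optimal_n_sub n D = theoretical_optimal_n_sub_alt n D := by
  unfold theoretical_optimal_n_sub theoretical_optimal_n_sub_alt
  simp only [PySem.List.slice?_none_none_neg_one, Option.getD_some]
  rcases (show n ≤ 0 ∨ 0 < n by omega) with hn | hn
  · rw [PySem.List.pyRange_one_eq_nil (by omega), pvDivPairs]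
    rw [dif_neg (by nlinarith : ¬ (1:Int) * 1 ≤ n)]
    rfl
  · rw [pv_foldA_filter, ← pv_divlist_eq n (by omega)]

-- ===== VERDICT (by name: the statement is the Claim_ definition above) =====
theorem theoretical_optimal_n_sub_spec : Claim_equal_theoretical_optimal_n_sub := by
  intro n D _
  unfold Spec_theoretical_optimal_n_sub
  exact main_equiv n D
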